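-- pv_equiv track=rewrite | github.com/minsik-um/algorithm_practice | programmers/algorithm_data_structure/graph/방의 개수.py | bestSolution2
-- ===== SOURCE A (Python) =====
-- def get_crossed(edge):
--     '''
--     항상 앞순서 vertex가 작은 순서로 정렬되어 있다는 점 활용
--     '''
--     x1, y1 = edge[0]
--     x2, y2 = edge[1]
--     return tuple(sorted([(x1+1, y1),  (x2-1, y2)]))
--
-- def bestSolution2(arrows):
--     '''
--     중간점을 저장하지 않고 도착점만 매번 계산하면서
--     그 선이 대각선일 경우 다른 대각선이 기존에 있었는지 확인해 교차점도 고려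
--     '''
--     answer = 0
--     curr_pos = (0, 0)
--     dirs = [(0, 1), (1, 1), (1, 0), (1, -1),
--             (0, -1), (-1, -1), (-1, 0), (-1, 1)]
--     visited_nodes = set()
--     visited_edges = set()
--     visited_nodes.add(curr_pos)
--
--     for arrow in arrows:
--         next_pos = (dirs[arrow][0] + curr_pos[0], dirs[arrow][1] + curr_pos[1])
--         edge = tuple(sorted([curr_pos, next_pos]))
--
--         if edge not in visited_edges and next_pos in visited_nodes:
--             answer += 1
--
--         if (edge[0][0] != edge[1][0] and edge[0][1] != edge[1][1]) \
--                 and (get_crossed(edge) in visited_edges):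
--             answer += 1
--
--         visited_nodes.add(next_pos)
--         visited_edges.add(edge)
--         curr_pos = next_pos
--
--     return answer
-- ===== SOURCE B (Python) =====
-- def bestSolution2(arrows):
--     dirs = [(0, 1), (1, 1), (1, 0), (1, -1),
--             (0, -1), (-1, -1), (-1, 0), (-1, 1)]
--     # Pass 1: the full node path.
--     path = [(0, 0)]
--     for a in arrows:
--         dx, dy = dirs[a]
--         x, y = path[-1]
--         path.append((x + dx, y + dy))
--     edges = [(path[i], path[i + 1]) if path[i] <= path[i + 1]
--              else (path[i + 1], path[i]) for i in range(len(arrows))]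
--     # Pass 2: first-occurrence index of every node and edge.
--     first_node = {}
--     for i, p in enumerate(path):
--         if p not in first_node:
--             first_node[p] = i
--     first_edge = {}
--     for i, e in enumerate(edges):
--         if e not in first_edge:
--             first_edge[e] = i
--     # Pass 3: count rooms by comparing first occurrences.
--     ans = 0
--     for i, e in enumerate(edges):
--         if first_edge[e] == i and first_node[path[i + 1]] <= i:
--             ans += 1
--         (x1, y1), (x2, y2) = e
--         if x1 != x2 and y1 != y2:
--             c1, c2 = (x1 + 1, y1), (x2 - 1, y2)
--             cross = (c1, c2) if c1 <= c2 else (c2, c1)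
--             if first_edge.get(cross, i) < i:
--                 ans += 1
--     return ans
-- ===== Notes on version B (the rewrite author's own statement) =====
-- stated objective: alternative
-- what changed: A simulates the walk once while mutating visited-node/visited-edge sets and incrementing online; B instead builds the whole node path, then first-occurrence index dictionaries for nodes and edges, and counts rooms in a final pass by comparing first-occurrence indices (no incremental visited sets).
import Mathlib
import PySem

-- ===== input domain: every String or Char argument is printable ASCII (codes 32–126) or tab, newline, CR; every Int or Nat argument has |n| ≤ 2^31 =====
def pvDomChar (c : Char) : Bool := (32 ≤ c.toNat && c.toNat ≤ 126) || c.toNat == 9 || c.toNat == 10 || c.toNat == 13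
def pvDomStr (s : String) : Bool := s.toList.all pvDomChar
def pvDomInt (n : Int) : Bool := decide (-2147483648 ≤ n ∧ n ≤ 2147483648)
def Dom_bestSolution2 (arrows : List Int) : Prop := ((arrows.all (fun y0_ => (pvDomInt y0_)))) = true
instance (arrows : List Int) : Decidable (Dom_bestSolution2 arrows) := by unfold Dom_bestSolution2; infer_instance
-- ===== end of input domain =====

-- B replaces A's online simulation with mutable visited sets by an offline three-pass scheme
-- (build the whole path, index first occurrences of nodes/edges in dicts, then count by
-- comparing first-occurrence indices); objective: alternative (same asymptotic cost).

-- shared helpers: the 8 direction vectors and Python's tuple(sorted([p, q])) on two pairs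
def dirsL : List (Int × Int) :=
  [(0, 1), (1, 1), (1, 0), (1, -1), (0, -1), (-1, -1), (-1, 0), (-1, 1)]

-- Python tuple comparison p <= q for pairs of ints (lexicographic) — exact
def pairLe (p q : Int × Int) : Bool := p.1 < q.1 || (p.1 == q.1 && p.2 ≤ q.2)

-- tuple(sorted([p, q])) for a two-element list of int pairs — exact ('(p,q) if p<=q else (q,p)')
def sortPair (p q : Int × Int) : (Int × Int) × (Int × Int) :=
  if pairLe p q then (p, q) else (q, p)

-- ===== PORT A =====
def getCrossed (e : (Int × Int) × (Int × Int)) : (Int × Int) × (Int × Int) :=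
  sortPair (e.1.1 + 1, e.1.2) (e.2.1 - 1, e.2.2)

-- state: (answer, curr_pos, visited_nodes, visited_edges); none = a dirs[arrow] IndexError occurred
def bestSolution2 (arrows : List Int) : Int :=
  let st0 : Option (Int × (Int × Int) × PySem.Set (Int × Int) × PySem.Set ((Int × Int) × (Int × Int))) :=
    some (0, (0, 0), PySem.Set.add PySem.Set.empty (0, 0), PySem.Set.empty)
  match arrows.foldl (fun st arrow =>
    match st with
    | none => none
    | some (ans, cur, vn, ve) =>
      match PySem.List.pyGet? dirsL arrow with
      | none => none
      | some d =>
        let nxt := (d.1 + cur.1, d.2 + cur.2)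
        let e := sortPair cur nxt
        let ans := if !(PySem.Set.contains ve e) && PySem.Set.contains vn nxt then ans + 1 else ans
        let ans := if (e.1.1 != e.2.1 && e.1.2 != e.2.2) && PySem.Set.contains ve (getCrossed e)
                   then ans + 1 else ans
        some (ans, nxt, PySem.Set.add vn nxt, PySem.Set.add ve e)) st0 with
  | some (ans, _, _, _) => ans
  | none => 0

-- ===== PORT B =====
-- pass 1 of Source B: the full node path; none = a dirs[a] IndexError occurred
def altPath (arrows : List Int) : Option (List (Int × Int)) :=
  arrows.foldl (fun po a =>
    match po with
    | none => none
    | some path =>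
      match PySem.List.pyGet? dirsL a with
      | none => none
      | some d =>
        let p := PySem.List.pyGetD path (-1) (0, 0)   -- path[-1]; path is never empty
        some (path ++ [(p.1 + d.1, p.2 + d.2)])) (some [(0, 0)])

-- first-occurrence dict of pass 2 ('if x not in first: first[x] = i')
def firstDict {α : Type} [BEq α] (l : List α) : PySem.Dict α Int :=
  (PySem.List.enumerate l 0).foldl
    (fun d ip => if d.contains ip.2 then d else d.insert ip.2 ip.1) PySem.Dict.empty

def bestSolution2_alt (arrows : List Int) : Int :=
  match altPath arrows with
  | none => 0
  | some path =>
    -- indices below are all in range, so pyGetD's default is never used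
    let edges := (List.range arrows.length).map (fun (i : Nat) =>
      sortPair (PySem.List.pyGetD path (i : Int) (0, 0)) (PySem.List.pyGetD path ((i : Int) + 1) (0, 0)))
    let firstNode := firstDict path
    let firstEdge := firstDict edges
    (PySem.List.enumerate edges 0).foldl (fun ans ie =>
      let i := ie.1
      let e := ie.2
      let ans := if firstEdge.getD e 0 == i
                    && firstNode.getD (PySem.List.pyGetD path (i + 1) (0, 0)) 0 ≤ i
                 then ans + 1 else ans
      let ans := if (e.1.1 != e.2.1 && e.1.2 != e.2.2)
                    && firstEdge.getD (sortPair (e.1.1 + 1, e.1.2) (e.2.1 - 1, e.2.2)) i < i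
                 then ans + 1 else ans
      ans) 0

-- ===== PRECONDITION & SPEC =====
-- Pre_ excludes exactly the inputs on which A raises IndexError (dirs[arrow] with arrow outside -8..7)
def Pre_bestSolution2 (arrows : List Int) : Prop := ∀ a ∈ arrows, -8 ≤ a ∧ a < 8
instance (arrows : List Int) : Decidable (Pre_bestSolution2 arrows) := by
  unfold Pre_bestSolution2; infer_instance

def pvWitness_bestSolution2 : List Int := [1, 4, 7, 3, 0, -1, 6, 2, 5, -8]

def Spec_bestSolution2 (arrows : List Int) (out : Int) : Prop := out = bestSolution2_alt arrows
instance (arrows : List Int) (out : Int) : Decidable (Spec_bestSolution2 arrows out) := by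
  unfold Spec_bestSolution2; infer_instance

-- ===== CLAIM (what is proved, stated in full; the proofs are below) =====
def Claim_equal_bestSolution2 : Prop := ∀ (arrows : List Int), Dom_bestSolution2 arrows → Pre_bestSolution2 arrows → Spec_bestSolution2 arrows (bestSolution2 arrows)


-- ===== LEMMAS AND PROOFS =====

-- canonical path/edge structure of a drawn arrow sequence (proof-side only)
def stepP (c d : Int × Int) : Int × Int := (d.1 + c.1, d.2 + c.2)

def dirOf (a : Int) : Int × Int := PySem.List.pyGetD dirsL a (0, 0)

def tailP (c : Int × Int) : List Int → List (Int × Int)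
  | [] => []
  | a :: as => stepP c (dirOf a) :: tailP (stepP c (dirOf a)) as

def mkPath (c : Int × Int) (as : List Int) : List (Int × Int) := c :: tailP c as

def endPt (c : Int × Int) : List Int → (Int × Int)
  | [] => c
  | a :: as => endPt (stepP c (dirOf a)) as

def edgesL (c : Int × Int) : List Int → List ((Int × Int) × (Int × Int))
  | [] => []
  | a :: as => sortPair c (stepP c (dirOf a)) :: edgesL (stepP c (dirOf a)) as

-- the common counting recursion both programs compute
def cnt (c : Int × Int) (V : List (Int × Int)) (E : List ((Int × Int) × (Int × Int))) :
    List Int → Int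
  | [] => 0
  | a :: as =>
    let nxt := stepP c (dirOf a)
    let e := sortPair c nxt
    (if e ∉ E ∧ nxt ∈ V then 1 else 0)
      + (if (e.1.1 ≠ e.2.1 ∧ e.1.2 ≠ e.2.2) ∧ getCrossed e ∈ E then 1 else 0)
      + cnt nxt (V ++ [nxt]) (E ++ [e]) as

lemma dir_in_range (a : Int) (h1 : -8 ≤ a) (h2 : a < 8) :
    PySem.List.pyGet? dirsL a = some (dirOf a) := by
  interval_cases a <;> rfl

lemma length_tailP (c : Int × Int) (as : List Int) : (tailP c as).length = as.length := by
  induction as generalizing c with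
  | nil => rfl
  | cons a as ih => simp [tailP, ih]

lemma length_edgesL (c : Int × Int) (as : List Int) : (edgesL c as).length = as.length := by
  induction as generalizing c with
  | nil => rfl
  | cons a as ih => simp [edgesL, ih]

lemma endPt_append (c : Int × Int) (l1 l2 : List Int) :
    endPt c (l1 ++ l2) = endPt (endPt c l1) l2 := by
  induction l1 generalizing c with
  | nil => rfl
  | cons a as ih => simp [endPt, ih]

lemma tailP_append (c : Int × Int) (l1 l2 : List Int) :
    tailP c (l1 ++ l2) = tailP c l1 ++ tailP (endPt c l1) l2 := by
  induction l1 generalizing c with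
  | nil => rfl
  | cons a as ih => simp [tailP, endPt, ih]

lemma edgesL_append (c : Int × Int) (l1 l2 : List Int) :
    edgesL c (l1 ++ l2) = edgesL c l1 ++ edgesL (endPt c l1) l2 := by
  induction l1 generalizing c with
  | nil => rfl
  | cons a as ih => simp [edgesL, endPt, ih]

lemma idx_lt_iff_mem_take {α : Type} [BEq α] [LawfulBEq α] (l : List α) : ∀ (x : α) (k j : Nat),
    PySem.List.index? l x = some j → (j < k ↔ x ∈ l.take k) := by
  induction l with
  | nil => intro x k j h; simp [PySem.List.index?, List.idxOf?] at h
  | cons y l ih =>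
    intro x k j h
    by_cases hxy : y = x
    · subst hxy
      rw [PySem.List.index?_cons_self] at h
      cases h
      cases k with
      | zero => simp
      | succ k => simp
    · rw [PySem.List.index?_cons_of_ne l hxy] at h
      cases hj : PySem.List.index? l x with
      | none => rw [hj] at h; simp at h
      | some j' =>
        rw [hj] at h; simp at h
        subst h
        cases k with
        | zero => simp
        | succ k =>
          have hiff := ih x k j' hj
          simp only [List.take_succ_cons, List.mem_cons]
          constructor
          · intro hlt; exact Or.inr (hiff.1 (by omega))
          · rintro (hx | hx)
            · exact absurd hx.symm hxy
            · have := hiff.2 hx; omega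

lemma firstFold_get? {α : Type} [BEq α] [LawfulBEq α] (l : List α) : ∀ (s : Int)
    (d : PySem.Dict α Int) (x : α),
    ((PySem.List.enumerate l s).foldl
        (fun d ip => if d.contains ip.2 then d else d.insert ip.2 ip.1) d).get? x
      = if d.contains x then d.get? x
        else (PySem.List.index? l x).map (fun k => s + (k : Int)) := by
  induction l with
  | nil =>
    intro s d x
    simp only [PySem.List.enumerate, List.foldl_nil]
    by_cases hdx : d.contains x
    · rw [if_pos hdx]
    · rw [if_neg hdx, PySem.Dict.contains_eq_isSome_get?] at *
      cases hg : d.get? x with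
      | some v => rw [hg] at hdx; simp at hdx
      | none => simp [PySem.List.index?, List.idxOf?]
  | cons y l ih =>
    intro s d x
    rw [PySem.List.enumerate_cons]
    simp only [List.foldl_cons]
    by_cases hdy : d.contains y
    · rw [if_pos hdy, ih]
      by_cases hxy : y = x
      · subst hxy
        rw [PySem.List.index?_cons_self]
        simp [hdy]
      · rw [PySem.List.index?_cons_of_ne l hxy]
        by_cases hdx : d.contains x
        · rw [if_pos hdx, if_pos hdx]
        · rw [if_neg hdx, if_neg hdx]
          cases PySem.List.index? l x <;> simp
          ring
    · rw [if_neg hdy, ih]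
      by_cases hxy : y = x
      · subst hxy
        have h1 : (d.insert y s).contains y = true := by
          rw [PySem.Dict.contains_eq_isSome_get?, PySem.Dict.get?_insert_self]; rfl
        rw [if_pos h1, PySem.List.index?_cons_self, if_neg hdy,
          PySem.Dict.get?_insert_self]
        simp
      · have h1 : (d.insert y s).contains x = d.contains x := by
          rw [PySem.Dict.contains_eq_isSome_get?, PySem.Dict.contains_eq_isSome_get?,
            PySem.Dict.get?_insert_of_ne d s (Ne.symm hxy)]
        rw [h1, PySem.List.index?_cons_of_ne l hxy]
        by_cases hdx : d.contains x
        · rw [if_pos hdx, if_pos hdx, PySem.Dict.get?_insert_of_ne d s (Ne.symm hxy)]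
        · rw [if_neg hdx, if_neg hdx]
          cases PySem.List.index? l x <;> simp
          ring

lemma firstDict_get? {α : Type} [BEq α] [LawfulBEq α] (l : List α) (x : α) :
    (firstDict l).get? x = (PySem.List.index? l x).map (fun k => (k : Int)) := by
  have := firstFold_get? l 0 PySem.Dict.empty x
  simpa [firstDict, PySem.Dict.empty, PySem.Dict.contains, PySem.Dict.get?] using this

-- first-occurrence getD facts, specialised to an element sitting at position |pre|
lemma firstDict_getD_self {α : Type} [BEq α] [LawfulBEq α] (pre suf : List α) (x : α) (d0 : Int) :
    ((firstDict (pre ++ x :: suf)).getD x d0 == (pre.length : Int)) = decide (x ∉ pre) := by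
  have hx : x ∈ pre ++ x :: suf := by simp
  obtain ⟨j, hj⟩ := Option.isSome_iff_exists.1 ((PySem.List.index?_isSome_iff _ _).2 hx)
  have hgd : (firstDict (pre ++ x :: suf)).getD x d0 = (j : Int) := by
    show ((firstDict (pre ++ x :: suf)).get? x).getD d0 = _
    rw [firstDict_get?, hj]; rfl
  have hjk := idx_lt_iff_mem_take (pre ++ x :: suf) x (pre.length + 1) j hj
  have hjk' := idx_lt_iff_mem_take (pre ++ x :: suf) x pre.length j hj
  have htk1 : (pre ++ x :: suf).take (pre.length + 1) = pre ++ [x] := by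
    rw [List.take_append]
    simp
  have htk : (pre ++ x :: suf).take pre.length = pre := List.take_left
  rw [htk1] at hjk
  rw [htk] at hjk'
  have hjle : j ≤ pre.length := by
    have := hjk.2 (by simp)
    omega
  by_cases hmem : x ∈ pre
  · have hlt : j < pre.length := hjk'.2 hmem
    rw [hgd]
    simp only [hmem, not_true_eq_false, decide_false, beq_eq_false_iff_ne]
    intro hc
    have : j = pre.length := by exact_mod_cast hc
    omega
  · have : ¬ j < pre.length := fun hc => hmem (hjk'.1 hc)
    have hj' : j = pre.length := by omega
    rw [hgd, hj']
    simp [hmem]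

-- membership form: getD ≤ k ↔ x ∈ pre (pre of length k+1), for x anywhere in pre++suf
lemma firstDict_getD_le_iff {α : Type} [BEq α] [LawfulBEq α] (pre suf : List α) (x : α)
    (hx : x ∈ pre ++ suf) (d0 : Int) (k : Nat) (hk : pre.length = k + 1) :
    ((firstDict (pre ++ suf)).getD x d0 ≤ (k : Int)) ↔ x ∈ pre := by
  obtain ⟨j, hj⟩ := Option.isSome_iff_exists.1 ((PySem.List.index?_isSome_iff _ _).2 hx)
  have hgd : (firstDict (pre ++ suf)).getD x d0 = (j : Int) := by
    show ((firstDict (pre ++ suf)).get? x).getD d0 = _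
    rw [firstDict_get?, hj]; rfl
  have hjk := idx_lt_iff_mem_take (pre ++ suf) x pre.length j hj
  rw [List.take_left] at hjk
  rw [hgd]
  constructor
  · intro h
    exact hjk.1 (by omega)
  · intro h
    have := hjk.2 h
    have : j ≤ k := by omega
    exact_mod_cast this

lemma firstDict_getD_lt_iff {α : Type} [BEq α] [LawfulBEq α] (pre suf : List α) (x : α)
    (k : Nat) (hk : pre.length = k) :
    ((firstDict (pre ++ suf)).getD x (k : Int) < (k : Int)) ↔ x ∈ pre := by
  by_cases hx : x ∈ pre ++ suf
  · obtain ⟨j, hj⟩ := Option.isSome_iff_exists.1 ((PySem.List.index?_isSome_iff _ _).2 hx)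
    have hgd : (firstDict (pre ++ suf)).getD x (k : Int) = (j : Int) := by
      show ((firstDict (pre ++ suf)).get? x).getD _ = _
      rw [firstDict_get?, hj]; rfl
    have hjk := idx_lt_iff_mem_take (pre ++ suf) x pre.length j hj
    rw [List.take_left] at hjk
    rw [hgd, hk] at *
    constructor
    · intro h
      exact hjk.1 (by exact_mod_cast h)
    · intro h
      exact_mod_cast hjk.2 h
  · have hnone : PySem.List.index? (pre ++ suf) x = none := by
      cases hi : PySem.List.index? (pre ++ suf) x with
      | none => rfl
      | some j =>
        exact absurd ((PySem.List.index?_isSome_iff _ _).1 (by rw [hi]; rfl)) hx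
    have hgd : (firstDict (pre ++ suf)).getD x (k : Int) = (k : Int) := by
      show ((firstDict (pre ++ suf)).get? x).getD _ = _
      rw [firstDict_get?, hnone]; rfl
    rw [hgd]
    simp only [lt_self_iff_false, false_iff]
    intro hc
    exact hx (List.mem_append_left _ hc)

lemma contains_congr {α : Type} [BEq α] [LawfulBEq α] (s : PySem.Set α) (L : List α)
    (h : ∀ x, x ∈ s ↔ x ∈ L) (y : α) : PySem.Set.contains s y = decide (y ∈ L) := by
  by_cases hy : y ∈ L
  · simp only [hy, decide_true]
    exact (PySem.Set.contains_iff s y).2 ((h y).2 hy)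
  · simp only [hy, decide_false]
    rw [← Bool.not_eq_true]
    intro hc
    exact hy ((h y).1 ((PySem.Set.contains_iff s y).1 hc))

lemma foldA_eq (as : List Int) : ∀ (ans : Int) (c : Int × Int)
    (vn : PySem.Set (Int × Int)) (ve : PySem.Set ((Int × Int) × (Int × Int)))
    (V : List (Int × Int)) (E : List ((Int × Int) × (Int × Int))),
    (∀ a ∈ as, -8 ≤ a ∧ a < 8) →
    (∀ x, x ∈ vn ↔ x ∈ V) → (∀ x, x ∈ ve ↔ x ∈ E) →
    ∃ c' vn' ve',
      as.foldl (fun st arrow =>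
        match st with
        | none => none
        | some (ans, cur, vn, ve) =>
          match PySem.List.pyGet? dirsL arrow with
          | none => none
          | some d =>
            let nxt := (d.1 + cur.1, d.2 + cur.2)
            let e := sortPair cur nxt
            let ans := if !(PySem.Set.contains ve e) && PySem.Set.contains vn nxt then ans + 1 else ans
            let ans := if (e.1.1 != e.2.1 && e.1.2 != e.2.2) && PySem.Set.contains ve (getCrossed e)
                       then ans + 1 else ans
            some (ans, nxt, PySem.Set.add vn nxt, PySem.Set.add ve e)) (some (ans, c, vn, ve))
      = some (ans + cnt c V E as, c', vn', ve') := by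
  induction as with
  | nil =>
    intro ans c vn ve V E _ _ _
    exact ⟨c, vn, ve, by simp [cnt]⟩
  | cons a as ih =>
    intro ans c vn ve V E hpre hV hE
    have ha := hpre a (by simp)
    simp only [List.foldl_cons]
    rw [dir_in_range a ha.1 ha.2]
    simp only []
    rw [contains_congr ve E hE, contains_congr vn V hV, contains_congr ve E hE]
    set nxt := ((dirOf a).1 + c.1, (dirOf a).2 + c.2) with hnxt
    have hnxt' : nxt = stepP c (dirOf a) := rfl
    set e := sortPair c nxt with he
    obtain ⟨c', vn', ve', hrec⟩ :=
      ih (if (e.1.1 != e.2.1 && e.1.2 != e.2.2) && decide (getCrossed e ∈ E)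
            then (if !decide (e ∈ E) && decide (nxt ∈ V) then ans + 1 else ans) + 1
            else (if !decide (e ∈ E) && decide (nxt ∈ V) then ans + 1 else ans))
        nxt (PySem.Set.add vn nxt) (PySem.Set.add ve e) (V ++ [nxt]) (E ++ [e])
        (fun x hx => hpre x (by simp [hx]))
        (by intro x; simp [PySem.Set.mem_add, hV])
        (by intro x; simp [PySem.Set.mem_add, hE])
    refine ⟨c', vn', ve', ?_⟩
    rw [hrec]
    congr 2
    show _ = ans + cnt c V E (a :: as)
    rw [show cnt c V E (a :: as) =
      (if sortPair c (stepP c (dirOf a)) ∉ E ∧ stepP c (dirOf a) ∈ V then 1 else 0)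
      + (if ((sortPair c (stepP c (dirOf a))).1.1 ≠ (sortPair c (stepP c (dirOf a))).2.1
              ∧ (sortPair c (stepP c (dirOf a))).1.2 ≠ (sortPair c (stepP c (dirOf a))).2.2)
            ∧ getCrossed (sortPair c (stepP c (dirOf a))) ∈ E then 1 else 0)
      + cnt (stepP c (dirOf a)) (V ++ [stepP c (dirOf a)]) (E ++ [sortPair c (stepP c (dirOf a))]) as
      from rfl]
    rw [← hnxt', ← he]
    by_cases h1 : e ∈ E <;> by_cases h2 : nxt ∈ V <;> by_cases h3 : getCrossed e ∈ E <;>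
      by_cases h4 : e.1.1 ≠ e.2.1 ∧ e.1.2 ≠ e.2.2 <;>
      simp [h1, h2, h3, h4, bne_iff_ne] <;> (try split_ifs) <;> (first | ring | omega)

lemma altPath_fold (as : List Int) : ∀ (pre : List (Int × Int)) (h : pre ≠ []),
    (∀ a ∈ as, -8 ≤ a ∧ a < 8) →
    as.foldl (fun po a =>
      match po with
      | none => none
      | some path =>
        match PySem.List.pyGet? dirsL a with
        | none => none
        | some d =>
          let p := PySem.List.pyGetD path (-1) (0, 0)
          some (path ++ [(p.1 + d.1, p.2 + d.2)])) (some pre)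
    = some (pre ++ tailP (pre.getLast h) as) := by
  induction as with
  | nil => intro pre h _; simp [tailP]
  | cons a as ih =>
    intro pre h hpre
    have ha := hpre a (by simp)
    simp only [List.foldl_cons]
    rw [dir_in_range a ha.1 ha.2]
    simp only [PySem.List.pyGetD_neg_one pre (0,0) h]
    have hnx : (((pre.getLast h).1 + (dirOf a).1, (pre.getLast h).2 + (dirOf a).2))
        = stepP (pre.getLast h) (dirOf a) := by
      simp [stepP]; constructor <;> ring
    rw [hnx]
    have hne : pre ++ [stepP (pre.getLast h) (dirOf a)] ≠ [] := by simp
    rw [ih (pre ++ [stepP (pre.getLast h) (dirOf a)]) hne (fun x hx => hpre x (by simp [hx]))]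
    have hlast : (pre ++ [stepP (pre.getLast h) (dirOf a)]).getLast hne
        = stepP (pre.getLast h) (dirOf a) := by
      simp
    rw [hlast]
    simp [tailP]

lemma altPath_eq (arrows : List Int) (h : ∀ a ∈ arrows, -8 ≤ a ∧ a < 8) :
    altPath arrows = some (mkPath (0, 0) arrows) := by
  unfold altPath
  rw [altPath_fold arrows [(0, 0)] (by simp) h]
  rfl

lemma edges_map_eq (as : List Int) : ∀ (c : Int × Int),
    (List.range as.length).map (fun (i : Nat) =>
      sortPair (PySem.List.pyGetD (mkPath c as) (i : Int) (0, 0))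
               (PySem.List.pyGetD (mkPath c as) ((i : Int) + 1) (0, 0)))
    = edgesL c as := by
  induction as with
  | nil => intro c; simp [edgesL]
  | cons a as ih =>
    intro c
    have hr : List.range (a :: as).length = 0 :: (List.range as.length).map Nat.succ := by
      simp [List.range_succ_eq_map]
    rw [hr, List.map_cons, List.map_map]
    congr 1
    · show sortPair (PySem.List.pyGetD (mkPath c (a :: as)) ((0:Nat) : Int) (0, 0))
        (PySem.List.pyGetD (mkPath c (a :: as)) (((0:Nat) : Int) + 1) (0, 0))
        = sortPair c (stepP c (dirOf a))
      have h1 : PySem.List.pyGetD (mkPath c (a :: as)) ((0:Nat) : Int) (0, 0) = c := by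
        simp [mkPath, tailP]
      have h2 : PySem.List.pyGetD (mkPath c (a :: as)) (((0:Nat) : Int) + 1) (0, 0)
          = stepP c (dirOf a) := by
        have : (((0:Nat) : Int) + 1) = ((1:Nat) : Int) := by norm_num
        rw [this, PySem.List.pyGetD_natCast]
        simp [mkPath, tailP]
      rw [h1, h2]
    · show (List.range as.length).map _ = edgesL (stepP c (dirOf a)) as
      rw [← ih (stepP c (dirOf a))]
      apply List.map_congr_left
      intro i hi
      simp only [Function.comp]
      have e1 : ((Nat.succ i : Nat) : Int) = ((i : Nat) : Int) + 1 := by push_cast; ring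
      have g1 : ∀ (j : Nat), PySem.List.pyGetD (mkPath c (a :: as)) ((j : Int) + 1) (0, 0)
          = PySem.List.pyGetD (mkPath (stepP c (dirOf a)) as) ((j : Int)) (0, 0) := by
        intro j
        have : ((j : Int) + 1) = (((j + 1 : Nat)) : Int) := by push_cast; ring
        rw [this, PySem.List.pyGetD_natCast, PySem.List.pyGetD_natCast]
        show (mkPath c (a :: as)).getD (j + 1) (0,0) = _
        simp [mkPath, tailP]
      have e2 : ((i : Int) + 1 + 1) = (((i + 1 : Nat)) : Int) + 1 := by push_cast; ring
      have e3 : (((i + 1 : Nat)) : Int) = (i : Int) + 1 := by push_cast; ring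
      rw [e1, g1 i, e2, g1 (i + 1), e3]

lemma bridge (arrows : List Int) (as2 : List Int) : ∀ (as1 : List Int), arrows = as1 ++ as2 →
    ∀ (init : Int),
    (PySem.List.enumerate (edgesL (endPt (0, 0) as1) as2) ((as1.length : Int))).foldl
      (fun ans ie =>
        let i := ie.1
        let e := ie.2
        let ans := if (firstDict (edgesL (0, 0) arrows)).getD e 0 == i
                      && (firstDict (mkPath (0, 0) arrows)).getD
                           (PySem.List.pyGetD (mkPath (0, 0) arrows) (i + 1) (0, 0)) 0 ≤ i
                   then ans + 1 else ans
        let ans := if (e.1.1 != e.2.1 && e.1.2 != e.2.2)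
                      && (firstDict (edgesL (0, 0) arrows)).getD
                           (sortPair (e.1.1 + 1, e.1.2) (e.2.1 - 1, e.2.2)) i < i
                   then ans + 1 else ans
        ans) init
    = init + cnt (endPt (0, 0) as1) (mkPath (0, 0) as1) (edgesL (0, 0) as1) as2 := by
  induction as2 with
  | nil =>
    intro as1 _ init
    simp [edgesL, cnt]
  | cons a as2 ih =>
    intro as1 harr init
    -- abbreviations
    set c := endPt (0, 0) as1 with hc
    set nxt := stepP c (dirOf a) with hnxt
    set e := sortPair c nxt with he
    set k := as1.length with hk
    set Vl := mkPath (0, 0) as1 with hVl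
    set El := edgesL (0, 0) as1 with hEl
    have hVlen : Vl.length = k + 1 := by rw [hVl, mkPath]; simp [length_tailP, hk]
    have hElen : El.length = k := by rw [hEl, length_edgesL]
    -- global decompositions
    have hP : mkPath (0, 0) arrows = Vl ++ nxt :: tailP nxt as2 := by
      rw [harr, mkPath, tailP_append, ← hc]
      show (0, 0) :: (tailP (0, 0) as1 ++ tailP c (a :: as2)) = _
      rw [show tailP c (a :: as2) = nxt :: tailP nxt as2 from rfl]
      simp [hVl, mkPath]
    have hEgl : edgesL (0, 0) arrows = El ++ e :: edgesL nxt as2 := by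
      rw [harr, edgesL_append, ← hc, ← hEl]
      rfl
    -- unfold one step of the fold
    rw [show edgesL c (a :: as2) = e :: edgesL nxt as2 from rfl,
      PySem.List.enumerate_cons, List.foldl_cons]
    -- the three conditions
    have hcond1 : ((firstDict (edgesL (0, 0) arrows)).getD e 0 == (k : Int))
        = decide (e ∉ El) := by
      rw [hEgl, ← hElen]
      exact firstDict_getD_self El (edgesL nxt as2) e 0
    have hgetP : PySem.List.pyGetD (mkPath (0, 0) arrows) ((k : Int) + 1) (0, 0) = nxt := by
      have hcast : ((k : Int) + 1) = ((k + 1 : Nat) : Int) := by push_cast; ring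
      rw [hcast, PySem.List.pyGetD_natCast, hP]
      rw [List.getD_append_right _ _ _ _ (by omega)]
      rw [hVlen]
      simp
    have hcond2 : ((firstDict (mkPath (0, 0) arrows)).getD nxt 0 ≤ (k : Int)) ↔ nxt ∈ Vl := by
      rw [hP, show Vl ++ nxt :: tailP nxt as2 = Vl ++ (nxt :: tailP nxt as2) from rfl]
      exact firstDict_getD_le_iff Vl (nxt :: tailP nxt as2) nxt (by simp) 0 k hVlen
    have hcond3 : ((firstDict (edgesL (0, 0) arrows)).getD (getCrossed e) (k : Int) < (k : Int))
        ↔ getCrossed e ∈ El := by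
      rw [hEgl]
      exact firstDict_getD_lt_iff El (e :: edgesL nxt as2) (getCrossed e) k hElen
    -- rewrite the RHS cnt one step
    rw [show cnt c Vl El (a :: as2) =
      (if e ∉ El ∧ nxt ∈ Vl then 1 else 0)
      + (if (e.1.1 ≠ e.2.1 ∧ e.1.2 ≠ e.2.2) ∧ getCrossed e ∈ El then 1 else 0)
      + cnt nxt (Vl ++ [nxt]) (El ++ [e]) as2 from rfl]
    -- use the IH at as1 ++ [a]
    have harr' : arrows = (as1 ++ [a]) ++ as2 := by simp [harr]
    have hend' : endPt (0, 0) (as1 ++ [a]) = nxt := by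
      rw [endPt_append, ← hc]; rfl
    have hlen' : ((as1 ++ [a]).length : Int) = (k : Int) + 1 := by
      simp [hk]
    have hmk' : mkPath (0, 0) (as1 ++ [a]) = Vl ++ [nxt] := by
      rw [mkPath, tailP_append, ← hc]
      simp [hVl, mkPath]
      rfl
    have hed' : edgesL (0, 0) (as1 ++ [a]) = El ++ [e] := by
      rw [edgesL_append, ← hc, ← hEl]
      rfl
    have hIH := ih (as1 ++ [a]) harr'
    rw [hend', hlen', hmk', hed'] at hIH
    rw [hIH]
    -- now pure arithmetic over the step value
    show (let i := (k : Int);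
          let ee := e;
          let ans := if (firstDict (edgesL (0, 0) arrows)).getD ee 0 == i
                      && (firstDict (mkPath (0, 0) arrows)).getD
                           (PySem.List.pyGetD (mkPath (0, 0) arrows) (i + 1) (0, 0)) 0 ≤ i
                   then init + 1 else init
          let ans := if (ee.1.1 != ee.2.1 && ee.1.2 != ee.2.2)
                      && (firstDict (edgesL (0, 0) arrows)).getD
                           (sortPair (ee.1.1 + 1, ee.1.2) (ee.2.1 - 1, ee.2.2)) i < i
                   then ans + 1 else ans
          ans) + cnt nxt (Vl ++ [nxt]) (El ++ [e]) as2 = _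
    simp only [hgetP, hcond1]
    rw [show sortPair (e.1.1 + 1, e.1.2) (e.2.1 - 1, e.2.2) = getCrossed e from rfl]
    by_cases h1 : e ∈ El <;> by_cases h2 : nxt ∈ Vl <;> by_cases h3 : getCrossed e ∈ El <;>
      by_cases h4 : e.1.1 ≠ e.2.1 ∧ e.1.2 ≠ e.2.2 <;>
      simp [h1, h2, h3, h4, hcond2, hcond3, bne_iff_ne] <;> (try split_ifs) <;>
        (first | ring | omega)

lemma bestSolution2_eq_cnt (arrows : List Int) (h : ∀ a ∈ arrows, -8 ≤ a ∧ a < 8) :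
    bestSolution2 arrows = cnt (0, 0) [(0, 0)] [] arrows := by
  obtain ⟨c', vn', ve', hrec⟩ := foldA_eq arrows 0 (0, 0)
    (PySem.Set.add PySem.Set.empty (0, 0)) PySem.Set.empty [(0, 0)] [] h
    (by intro x; simp [PySem.Set.empty])
    (by intro x; simp [PySem.Set.empty])
  unfold bestSolution2
  simp only []
  rw [hrec]
  simp

lemma bestSolution2_alt_eq_cnt (arrows : List Int) (h : ∀ a ∈ arrows, -8 ≤ a ∧ a < 8) :
    bestSolution2_alt arrows = cnt (0, 0) [(0, 0)] [] arrows := by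
  unfold bestSolution2_alt
  rw [altPath_eq arrows h]
  simp only []
  rw [edges_map_eq arrows (0, 0)]
  have hb := bridge arrows arrows [] rfl 0
  simp only [List.length_nil, Nat.cast_zero] at hb
  rw [show endPt (0, 0) [] = (0, 0) from rfl, show mkPath (0, 0) [] = [(0, 0)] from rfl,
    show edgesL (0, 0) [] = [] from rfl] at hb
  rw [hb]
  ring

-- ===== VERDICT (by name: the statement is the Claim_ definition above) =====
theorem bestSolution2_spec : Claim_equal_bestSolution2 := by
  intro arrows _ hpre
  unfold Spec_bestSolution2
  rw [bestSolution2_eq_cnt arrows hpre, bestSolution2_alt_eq_cnt arrows hpre]
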